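-- pv_equiv track=rewrite | github.com/TanelPaal/Programming-Introductory-Course | KT/kt1/exam.py | has_seven
-- ===== SOURCE A (Python) =====
-- def has_seven(nums):
--     """
--     Whether the list has three 7s and no repeated consecutive elements.
--
--     Given a list if ints, return True if the value 7 appears in the list exactly 3 times
--     and no consecutive elements have the same value.
--
--     has_seven([1, 2, 3]) => False
--     has_seven([7, 1, 7, 7]) => False
--     has_seven([7, 1, 7, 1, 7]) => True
--     has_seven([7, 1, 7, 1, 1, 7]) => False
--     """
--     sevens_count = 0
--
--     for i in range(len(nums)):
--         if nums[i] == 7: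
--             sevens_count += 1
--
--         if i > 0 and nums[i] == nums[i - 1]:
--             return False
--
--     return sevens_count == 3
-- ===== SOURCE B (Python) =====
-- def has_seven(nums):
--     # Run-length encode the list, then judge the runs:
--     # no consecutive duplicates <=> every run has length 1;
--     # the number of 7s is the total length of the runs whose value is 7.
--     runs = []
--     for x in nums:
--         if runs and runs[-1][0] == x:
--             runs[-1] = (x, runs[-1][1] + 1)
--         else:
--             runs.append((x, 1))
--     return all(length == 1 for _, length in runs) and sum(length for value, length in runs if value == 7) == 3
-- ===== Notes on version B (the rewrite author's own statement) =====
-- stated objective: alternative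
-- what changed: Instead of A's fused index loop with early return, B first builds a run-length encoding of the list and then decides the answer from the runs: all run lengths are 1 and the 7-runs' lengths sum to 3.
import Mathlib
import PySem

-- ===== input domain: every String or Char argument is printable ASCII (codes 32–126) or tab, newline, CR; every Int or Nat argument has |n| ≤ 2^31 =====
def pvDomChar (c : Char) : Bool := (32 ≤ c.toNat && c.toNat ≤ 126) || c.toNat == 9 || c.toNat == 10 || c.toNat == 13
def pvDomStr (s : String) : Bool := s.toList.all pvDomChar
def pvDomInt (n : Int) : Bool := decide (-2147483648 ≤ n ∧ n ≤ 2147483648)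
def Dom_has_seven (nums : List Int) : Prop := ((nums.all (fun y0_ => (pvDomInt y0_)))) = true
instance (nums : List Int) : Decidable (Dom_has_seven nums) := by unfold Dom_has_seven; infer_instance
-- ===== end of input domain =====

-- B replaces A's fused index loop (with early return) by a run-length encoding pass
-- followed by two checks on the runs; same return value (alternative algorithm).


-- ===== PORT A =====
-- the 'for i in range(len(nums))' loop with state sevens_count; early 'return False' inside
def hasSevenGo (nums : List Int) (i : Nat) (cnt : Int) : Bool :=
  if _h : i < nums.length then
    let cnt' := if nums.getD i 0 = 7 then cnt + 1 else cnt   -- nums[i] == 7 (i in range)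
    if i > 0 && nums.getD i 0 == nums.getD (i - 1) 0 then false   -- nums[i] == nums[i-1]
    else hasSevenGo nums (i + 1) cnt'
  else cnt == 3
termination_by nums.length - i

def has_seven (nums : List Int) : Bool := hasSevenGo nums 0 0

-- ===== PORT B =====
-- the body of B's for-loop: extend the last run in place or append a new run
-- (runs[-1] -> getLast?, the in-place 'runs[-1] = ...' -> dropLast ++ [new last])
def buildRunsStep (runs : List (Int × Int)) (x : Int) : List (Int × Int) :=
  match runs.getLast? with
  | some (v, l) => if v = x then runs.dropLast ++ [(x, l + 1)] else runs ++ [(x, 1)]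
  | none => [(x, 1)]

-- 'runs' after B's for-loop (in encounter order, as in Source B)
def buildRuns (nums : List Int) : List (Int × Int) := nums.foldl buildRunsStep []

def has_seven_alt (nums : List Int) : Bool :=
  let runs := buildRuns nums
  (runs.all fun p => p.2 == 1) &&
  ((runs.filterMap fun p => if p.1 = 7 then some p.2 else none).sum == 3)

-- ===== PRECONDITION & SPEC =====
def Spec_has_seven (nums : List Int) (out : Bool) : Prop := out = has_seven_alt nums
instance (nums : List Int) (out : Bool) : Decidable (Spec_has_seven nums out) := by unfold Spec_has_seven; infer_instance

-- ===== CLAIM (what is proved, stated in full; the proofs are below) =====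
def Claim_equal_has_seven : Prop := ∀ (nums : List Int), Dom_has_seven nums → Spec_has_seven nums (has_seven nums)

-- ===== LEMMAS AND PROOFS =====

-- proof helper: the same run-building step on a REVERSED runs list (most recent run in front)
def revRunsStep (runs : List (Int × Int)) (x : Int) : List (Int × Int) :=
  match runs with
  | (v, l) :: rest => if v = x then (x, l + 1) :: rest else (x, 1) :: (v, l) :: rest
  | [] => [(x, 1)]

-- the no-adjacent-duplicates check A's early return amounts to, as a pairwise scan
def pairsOK (nums : List Int) : Bool := ((nums.zip (nums.drop 1)).all (fun p => p.1 != p.2))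

theorem pairsOK_cons_cons (a b : Int) (t : List Int) :
    pairsOK (a :: b :: t) = ((a != b) && pairsOK (b :: t)) := by
  simp [pairsOK]

theorem pairsOK_short (l : List Int) (h : l.length ≤ 1) : pairsOK l = true := by
  match l, h with
  | [], _ => simp [pairsOK]
  | [a], _ => simp [pairsOK]

theorem count_drop_step (nums : List Int) (i : Nat) (h : i < nums.length) (cnt : Int) :
    cnt + ((nums.drop i).count 7 : Int)
      = (if nums.getD i 0 = 7 then cnt + 1 else cnt) + ((nums.drop (i + 1)).count 7 : Int) := by
  rw [List.drop_eq_getElem_cons h, List.getD_eq_getElem nums 0 h, List.count_cons]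
  by_cases h7 : nums[i] = 7
  · simp only [h7, beq_self_eq_true, if_pos]
    push_cast; ring
  · have : (nums[i] == 7) = false := by simp [h7]
    simp [this, h7]

theorem count_drop_step' (nums : List Int) (i : Nat) (h : i < nums.length) (cnt : Int) :
    cnt + ((nums.drop i).count 7 : Int)
      = (if nums[i] = 7 then cnt + 1 else cnt) + ((nums.drop (i + 1)).count 7 : Int) := by
  have := count_drop_step nums i h cnt
  rwa [List.getD_eq_getElem nums 0 h] at this

theorem go_eq (nums : List Int) (k : Nat) : ∀ (i : Nat) (cnt : Int),
    nums.length - i ≤ k → i ≤ nums.length →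
    hasSevenGo nums i cnt
      = (decide (cnt + ((nums.drop i).count 7 : Int) = 3) && pairsOK (nums.drop (i - 1))) := by
  induction k with
  | zero =>
    intro i cnt hk hle
    have hi : i = nums.length := by omega
    subst hi
    rw [hasSevenGo]
    simp only [lt_irrefl]
    have : pairsOK (nums.drop (nums.length - 1)) = true := by
      apply pairsOK_short; simp [List.length_drop]; omega
    simp [this, List.drop_length]
    rw [Bool.eq_iff_iff]; simp
  | succ k ih =>
    intro i cnt hk hle
    by_cases hi : i < nums.length
    · rw [hasSevenGo]
      rw [dif_pos hi]
      have hdropi : nums.drop i = nums[i] :: nums.drop (i + 1) := List.drop_eq_getElem_cons hi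
      by_cases hi0 : i = 0
      · subst hi0
        simp only [gt_iff_lt, lt_irrefl, decide_false, Bool.false_and, Bool.false_eq_true,
          if_false]
        rw [ih (0 + 1) _ (by omega) (by omega)]
        simp only [Nat.add_sub_cancel, Nat.zero_sub]
        rw [← count_drop_step nums 0 hi cnt]
      · have hi1 : i - 1 < nums.length := by omega
        have hdrop1 : nums.drop (i - 1) = nums[i - 1] :: nums.drop i := by
          have := List.drop_eq_getElem_cons hi1
          rwa [Nat.sub_add_cancel (by omega)] at this
        have hpp : pairsOK (nums.drop (i - 1)) = ((nums[i - 1] != nums[i]) && pairsOK (nums.drop i)) := by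
          rw [hdrop1, hdropi, pairsOK_cons_cons, ← hdropi]
        rw [List.getD_eq_getElem nums 0 hi, List.getD_eq_getElem nums 0 hi1]
        by_cases heq : nums[i] = nums[i - 1]
        · have hc : (decide (i > 0) && (nums[i] == nums[i - 1])) = true := by
            simp [heq]; omega
          rw [if_pos hc]
          simp [hpp, heq]
        · have hc : (decide (i > 0) && (nums[i] == nums[i - 1])) = false := by
            simp [heq]
          rw [if_neg (by simp [hc])]
          rw [ih (i + 1) _ (by omega) (by omega)]
          simp only [Nat.add_sub_cancel]
          rw [← count_drop_step' nums i hi cnt, hpp]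
          have hne : (nums[i - 1] != nums[i]) = true := by simp; exact fun h => heq h.symm
          rw [hdropi] at hpp ⊢
          rw [hne]
          simp [Bool.and_comm]
    · have h' : i = nums.length := by omega
      subst h'
      rw [hasSevenGo]
      simp only [lt_irrefl]
      have : pairsOK (nums.drop (nums.length - 1)) = true := by
        apply pairsOK_short; simp [List.length_drop]; omega
      simp [this, List.drop_length]
      rw [Bool.eq_iff_iff]; simp

-- so A's value is:  has_seven nums = decide (count 7 = 3) && pairsOK nums
theorem hasSeven_eq (nums : List Int) :
    has_seven nums = (decide (((nums.count 7 : Int)) = 3) && pairsOK nums) := by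
  unfold has_seven
  rw [go_eq nums nums.length 0 0 (by omega) (by omega)]
  simp

-- ---- B-side characterization of the run-length encoding ----

-- adjacency chain check relative to an optional previous element
def chainB (prev : Option Int) : List Int → Bool
  | [] => true
  | x :: t => (prev != some x) && chainB (some x) t

theorem chain_some : ∀ (l : List Int) (a : Int), chainB (some a) l = pairsOK (a :: l) := by
  intro l
  induction l with
  | nil => intro a; simp [chainB, pairsOK]
  | cons x t ih =>
    intro a
    rw [pairsOK_cons_cons, chainB, ← ih x]
    rfl

theorem chain_none (l : List Int) : chainB none l = pairsOK l := by
  cases l with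
  | nil => simp [chainB, pairsOK]
  | cons x t => rw [chainB, chain_some]; simp

def sevenSum (runs : List (Int × Int)) : Int :=
  (runs.filterMap fun p => if p.1 = 7 then some p.2 else none).sum

theorem sevenSum_cons (v n : Int) (r : List (Int × Int)) :
    sevenSum ((v, n) :: r) = (if v = 7 then n else 0) + sevenSum r := by
  simp only [sevenSum, List.filterMap_cons]
  split_ifs <;> simp

theorem sevenSum_step (acc : List (Int × Int)) (x : Int) :
    sevenSum (revRunsStep acc x) = sevenSum acc + (if x = 7 then 1 else 0) := by
  match acc with
  | [] =>
    show sevenSum [(x, 1)] = sevenSum [] + _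
    rw [sevenSum_cons]
    simp [sevenSum]
  | (v, l) :: r =>
    by_cases hv : v = x
    · subst hv
      show sevenSum ((if v = v then ((v, l + 1) :: r) else _)) = _
      rw [if_pos rfl, sevenSum_cons, sevenSum_cons]
      split_ifs <;> ring
    · show sevenSum ((if v = x then _ else ((x, 1) :: (v, l) :: r))) = _
      rw [if_neg hv, sevenSum_cons, sevenSum_cons]
      ring

theorem sevenSum_foldl : ∀ (l : List Int) (acc : List (Int × Int)),
    sevenSum (l.foldl revRunsStep acc) = sevenSum acc + (l.count 7 : Int) := by
  intro l
  induction l with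
  | nil => intro acc; simp
  | cons x t ih =>
    intro acc
    rw [List.foldl_cons, ih, sevenSum_step, List.count_cons]
    by_cases hx : x = 7
    · subst hx; simp; ring
    · have : (x == 7) = false := by simp [hx]
      simp [this, hx]

theorem allOnes_foldl : ∀ (l : List Int) (acc : List (Int × Int)),
    (∀ p ∈ acc, 1 ≤ p.2) →
    ((l.foldl revRunsStep acc).all fun p => p.2 == (1 : Int))
      = ((acc.all fun p => p.2 == (1 : Int)) && chainB (acc.head?.map Prod.fst) l) := by
  intro l
  induction l with
  | nil => intro acc _; simp [chainB]
  | cons x t ih =>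
    intro acc hacc
    rw [List.foldl_cons]
    cases acc with
    | nil =>
      rw [show revRunsStep [] x = [(x, 1)] from rfl, ih [(x, 1)] (by simp)]
      simp [chainB]
    | cons p r =>
      obtain ⟨v, n⟩ := p
      have hn : (1 : Int) ≤ n := hacc (v, n) (by simp)
      have hr : ∀ q ∈ r, (1 : Int) ≤ q.2 := fun q hq => hacc q (List.mem_cons_of_mem _ hq)
      by_cases hv : v = x
      · have hstep : revRunsStep ((v, n) :: r) x = (x, n + 1) :: r := by
          simp [revRunsStep, hv]
        rw [hstep, ih ((x, n + 1) :: r) ?inv]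
        case inv =>
          intro q hq
          rcases List.mem_cons.mp hq with h | h
          · rw [h]; simpa using by omega
          · exact hr q h
        have h1 : ((n + 1 : Int) == 1) = false := by simp; omega
        simp [chainB, h1, hv]
      · have hstep : revRunsStep ((v, n) :: r) x = (x, 1) :: (v, n) :: r := by
          simp [revRunsStep, hv]
        rw [hstep, ih ((x, 1) :: (v, n) :: r) ?inv2]
        case inv2 =>
          intro q hq
          rcases List.mem_cons.mp hq with h | h
          · rw [h]
          · exact hacc q h
        have hvx : (some v != some x) = true := by simp [bne, hv]
        simp [chainB, hvx, Bool.and_assoc]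

theorem step_reverse (runs : List (Int × Int)) (x : Int) :
    buildRunsStep runs x = (revRunsStep runs.reverse x).reverse := by
  rcases hr : runs.reverse with _ | ⟨⟨v, l⟩, rt⟩
  · have h0 : runs = [] := by simpa using congrArg List.reverse hr
    subst h0; rfl
  · have hruns : runs = rt.reverse ++ [(v, l)] := by
      have := congrArg List.reverse hr
      simpa using this
    rw [hruns]
    simp only [buildRunsStep, revRunsStep, List.getLast?_concat, List.dropLast_concat]
    split_ifs <;> simp

theorem buildRuns_rev (nums : List Int) :
    buildRuns nums = (nums.foldl revRunsStep []).reverse := by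
  suffices h : ∀ (l : List Int) (acc : List (Int × Int)),
      l.foldl buildRunsStep acc = (l.foldl revRunsStep acc.reverse).reverse by
    simpa using h nums []
  intro l
  induction l with
  | nil => intro acc; simp
  | cons x t ih =>
    intro acc
    rw [List.foldl_cons, List.foldl_cons, ih, step_reverse, List.reverse_reverse]

theorem alt_unfold (nums : List Int) :
    has_seven_alt nums
      = (((buildRuns nums).all fun p => p.2 == (1 : Int)) && (sevenSum (buildRuns nums) == 3)) :=
  rfl

theorem sevenSum_reverse (runs : List (Int × Int)) : sevenSum runs.reverse = sevenSum runs := by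
  simp [sevenSum, List.filterMap_reverse]

-- ===== VERDICT (by name: the statement is the Claim_ definition above) =====
theorem has_seven_spec : Claim_equal_has_seven := by
  intro nums _
  unfold Spec_has_seven
  rw [hasSeven_eq, alt_unfold, buildRuns_rev, sevenSum_reverse, List.all_reverse]
  have h1 := allOnes_foldl nums [] (by simp)
  have h2 := sevenSum_foldl nums []
  have hz : sevenSum ([] : List (Int × Int)) = 0 := rfl
  rw [hz, zero_add] at h2
  simp only [List.all_nil, List.head?_nil, Option.map_none, chain_none, Bool.true_and] at h1
  rw [h1, h2]
  have : ((nums.count 7 : Int) == 3) = decide ((nums.count 7 : Int) = 3) := by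
    rw [Bool.eq_iff_iff]; simp
  rw [this, Bool.and_comm]
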